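-- pv_equiv track=rewrite | github.com/cesaranogilbert/ai-agent-ecosystem | services/customer_experience_orchestration_agent.py | _infer_communication_style
-- ===== SOURCE A (Python) =====
-- from typing import Dict, List, Any, Optional, Tuple
--
-- def _infer_communication_style(touchpoints: List[Dict[str, Any]]) -> str:
--     """Infer customer's communication style from touchpoints"""
--     # Analyze patterns in touchpoints to infer style
--     phone_usage = sum(1 for tp in touchpoints if tp.get("channel") == "phone")
--     chat_usage = sum(1 for tp in touchpoints if tp.get("channel") == "chat")
--     email_usage = sum(1 for tp in touchpoints if tp.get("channel") == "email")
--
--     if phone_usage > chat_usage + email_usage: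
--         return "direct_personal"
--     elif chat_usage > phone_usage + email_usage:
--         return "immediate_digital"
--     else:
--         return "formal_written"
-- ===== SOURCE B (Python) =====
-- from typing import Dict, List, Any, Optional, Tuple
--
-- def _infer_communication_style(touchpoints: List[Dict[str, Any]]) -> str:
--     """Infer communication style via signed dominance scores instead of channel counts.
--
--     Each channel contributes a weight pair to two signed scores:
--     dp = phone - (chat + email)  and  dc = chat - (phone + email).
--     'phone > chat + email' is exactly 'dp > 0', and 'chat > phone + email' is
--     exactly 'dc > 0', so a sign test on the accumulated scores reproduces A's
--     three-way decision without ever forming the three counts.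
--     """
--     WEIGHTS = {"phone": (1, -1), "chat": (-1, 1), "email": (-1, -1)}
--     dp = dc = 0
--     for tp in touchpoints:
--         wp, wc = WEIGHTS.get(tp.get("channel"), (0, 0))
--         dp += wp
--         dc += wc
--     if dp > 0:
--         return "direct_personal"
--     if dc > 0:
--         return "immediate_digital"
--     return "formal_written"
-- ===== Notes on version B (the rewrite author's own statement) =====
-- stated objective: alternative
-- what changed: A builds three channel frequency counts by three scans and compares each count against the sum of the other two; B never forms counts: it folds a weight table into two signed dominance scores (phone-vs-rest, chat-vs-rest) in one pass and decides by a sign test on the scores.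
import Mathlib
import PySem

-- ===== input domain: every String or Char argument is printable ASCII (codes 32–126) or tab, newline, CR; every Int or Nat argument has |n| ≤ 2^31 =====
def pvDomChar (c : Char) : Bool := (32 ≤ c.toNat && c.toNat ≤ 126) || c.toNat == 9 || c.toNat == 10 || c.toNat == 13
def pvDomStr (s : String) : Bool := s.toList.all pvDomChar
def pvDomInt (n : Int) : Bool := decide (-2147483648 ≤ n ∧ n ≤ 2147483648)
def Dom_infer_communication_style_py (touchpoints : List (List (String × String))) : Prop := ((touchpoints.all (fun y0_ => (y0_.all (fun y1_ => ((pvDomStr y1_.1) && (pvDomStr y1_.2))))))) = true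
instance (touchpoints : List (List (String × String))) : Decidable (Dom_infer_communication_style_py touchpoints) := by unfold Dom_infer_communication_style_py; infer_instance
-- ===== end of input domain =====

-- B replaces A's three frequency counts and count-sum comparisons by a single fold of a
-- weight table into two signed dominance scores decided by a sign test (objective: alternative).
-- ===== PORT A =====
-- tp.get("channel") for a dict given as an association list: first match
def pvGetChannel (tp : List (String × String)) : Option String :=
  PySem.Dict.get? (PySem.Dict.mk tp) "channel"

def infer_communication_style_py (touchpoints : List (List (String × String))) : String :=
  let phone_usage : Int := touchpoints.foldl (fun n tp => if pvGetChannel tp = some "phone" then n + 1 else n) 0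
  let chat_usage : Int := touchpoints.foldl (fun n tp => if pvGetChannel tp = some "chat" then n + 1 else n) 0
  let email_usage : Int := touchpoints.foldl (fun n tp => if pvGetChannel tp = some "email" then n + 1 else n) 0
  if phone_usage > chat_usage + email_usage then "direct_personal"
  else if chat_usage > phone_usage + email_usage then "immediate_digital"
  else "formal_written"

-- ===== PORT B =====
-- WEIGHTS.get(ch, (0, 0)) on the literal three-entry dict
def pvWeight (ch : Option String) : Int × Int :=
  if ch = some "phone" then (1, -1)
  else if ch = some "chat" then (-1, 1)
  else if ch = some "email" then (-1, -1)
  else (0, 0)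

def infer_communication_style_py_alt (touchpoints : List (List (String × String))) : String :=
  let s : Int × Int := touchpoints.foldl
    (fun s tp =>
      let w := pvWeight (pvGetChannel tp)
      (s.1 + w.1, s.2 + w.2)) (0, 0)
  if s.1 > 0 then "direct_personal"
  else if s.2 > 0 then "immediate_digital"
  else "formal_written"

-- ===== PRECONDITION & SPEC =====
def Spec_infer_communication_style_py (touchpoints : List (List (String × String))) (out : String) : Prop := out = infer_communication_style_py_alt touchpoints
instance (touchpoints : List (List (String × String))) (out : String) : Decidable (Spec_infer_communication_style_py touchpoints out) := by unfold Spec_infer_communication_style_py; infer_instance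

-- ===== CLAIM (what is proved, stated in full; the proofs are below) =====
def Claim_equal_infer_communication_style_py : Prop := ∀ (touchpoints : List (List (String × String))), Dom_infer_communication_style_py touchpoints → Spec_infer_communication_style_py touchpoints (infer_communication_style_py touchpoints)

-- ===== LEMMAS AND PROOFS =====

theorem pv_fold_count (P : List (String × String) → Prop) [DecidablePred P]
    (l : List (List (String × String))) (a : Int) :
    l.foldl (fun n tp => if P tp then n + 1 else n) a
      = a + (l.countP (fun tp => decide (P tp)) : Int) := by
  induction l generalizing a with
  | nil => simp
  | cons x xs ih =>
    simp only [List.foldl_cons, List.countP_cons]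
    rw [ih]
    by_cases h : P x <;> simp [h] <;> push_cast <;> ring

-- B's fold computes exactly (phone − chat − email, chat − phone − email) shifted by the accumulator
theorem pv_fold_scores (l : List (List (String × String))) (a b : Int) :
    l.foldl
      (fun s tp =>
        let w := pvWeight (pvGetChannel tp)
        (s.1 + w.1, s.2 + w.2)) ((a, b) : Int × Int)
    = (a + (l.countP (fun tp => decide (pvGetChannel tp = some "phone")) : Int)
         - (l.countP (fun tp => decide (pvGetChannel tp = some "chat")) : Int)
         - (l.countP (fun tp => decide (pvGetChannel tp = some "email")) : Int),
       b + (l.countP (fun tp => decide (pvGetChannel tp = some "chat")) : Int)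
         - (l.countP (fun tp => decide (pvGetChannel tp = some "phone")) : Int)
         - (l.countP (fun tp => decide (pvGetChannel tp = some "email")) : Int)) := by
  induction l generalizing a b with
  | nil => simp
  | cons x xs ih =>
    simp only [List.foldl_cons, List.countP_cons]
    rw [ih]
    by_cases hp : pvGetChannel x = some "phone"
    · simp [pvWeight, hp] ; constructor <;> push_cast <;> ring
    · by_cases hc : pvGetChannel x = some "chat"
      · simp [pvWeight, hp, hc] ; constructor <;> push_cast <;> ring
      · by_cases he : pvGetChannel x = some "email"
        · simp [pvWeight, hp, hc, he] ; constructor <;> push_cast <;> ring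
        · simp [pvWeight, hp, hc, he]

-- ===== VERDICT (by name: the statement is the Claim_ definition above) =====
theorem infer_communication_style_py_spec : Claim_equal_infer_communication_style_py := by
  intro touchpoints _
  unfold Spec_infer_communication_style_py infer_communication_style_py infer_communication_style_py_alt
  rw [pv_fold_scores,
    pv_fold_count (fun tp => pvGetChannel tp = some "phone") touchpoints 0,
    pv_fold_count (fun tp => pvGetChannel tp = some "chat") touchpoints 0,
    pv_fold_count (fun tp => pvGetChannel tp = some "email") touchpoints 0]
  simp only [zero_add]
  split_ifs <;> first | rfl | omega
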